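-- pv_equiv track=rewrite | github.com/karim-sharkawy/Notions-of-Positivity-and-Complexity-in-Quantum-Information-Theory | Pattern Recognition & Visualization.py | is_extendable
-- ===== SOURCE A (Python) =====
-- def is_extendable(matrix):
--     first_row = matrix[0]
--     a, b, c, d = first_row[0], first_row[1], first_row[2], first_row[3]
--     l = -min(a, b)
--     r = max(c, d)
--
--     # Check if -min(a,b) <= t <= max(c,d) holds for all t in the matrix
--     if not (l <= max(c, d)):
--         return False
--
--     # Check if -a, -b <= t <= c, d
--     for t in first_row:
--         if not (-a <= t <= c and -b <= t <= d):
--             return False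
--
--     return True
-- ===== SOURCE B (Python) =====
-- def is_extendable(matrix):
--     first_row = matrix[0]
--     a, b, c, d = first_row[0], first_row[1], first_row[2], first_row[3]
--     s = sorted(first_row)
--     lo, hi = s[0], s[-1]
--     return max(-a, -b) <= max(c, d) and max(-a, -b) <= lo and hi <= min(c, d)
-- ===== Notes on version B (the rewrite author's own statement) =====
-- stated objective: alternative
-- what changed: Instead of scanning every element with an early-returning loop of four comparisons each, B sorts the first row and checks the interval condition only at the two endpoints (smallest and largest element) against the tightened bounds max(-a,-b) and min(c,d).
import Mathlib
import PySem

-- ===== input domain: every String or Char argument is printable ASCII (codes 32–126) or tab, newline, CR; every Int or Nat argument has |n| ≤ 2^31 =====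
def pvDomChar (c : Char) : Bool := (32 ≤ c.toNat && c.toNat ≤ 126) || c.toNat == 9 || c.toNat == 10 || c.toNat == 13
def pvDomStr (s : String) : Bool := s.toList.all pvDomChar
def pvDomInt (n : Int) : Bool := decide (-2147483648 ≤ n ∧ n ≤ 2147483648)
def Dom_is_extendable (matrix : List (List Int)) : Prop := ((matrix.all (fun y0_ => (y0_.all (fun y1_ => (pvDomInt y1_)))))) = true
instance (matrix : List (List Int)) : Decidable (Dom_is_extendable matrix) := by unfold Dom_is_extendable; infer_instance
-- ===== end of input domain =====

-- B sorts the first row and checks the bound condition only at the two endpoints of the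
-- sorted row against the tightened bounds max(-a,-b) and min(c,d), instead of A's
-- early-returning per-element loop (objective: alternative algorithm).

-- ===== PORT A =====
-- the 'for t in first_row' loop with its early 'return False'
def pvALoop (a b c d : Int) : List Int → Bool
  | [] => true
  | t :: ts =>
    if ¬ (-a ≤ t ∧ t ≤ c ∧ -b ≤ t ∧ t ≤ d) then false
    else pvALoop a b c d ts

def is_extendable (matrix : List (List Int)) : Bool :=
  match matrix with
  | [] => false  -- unreachable under Pre_ (Python raises IndexError)
  | first_row :: _ =>
    match first_row with
    | a :: b :: c :: d :: rest =>
      let l := -(min a b)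
      let _r := max c d
      if ¬ (l ≤ max c d) then false
      else pvALoop a b c d (a :: b :: c :: d :: rest)
    | _ => false  -- unreachable under Pre_ (Python raises IndexError)

-- ===== PORT B =====
def is_extendable_alt (matrix : List (List Int)) : Bool :=
  match PySem.List.pyGet? matrix 0 with
  | none => false  -- unreachable under Pre_ (Python raises IndexError)
  | some first_row =>
    match PySem.List.pyGet? first_row 0, PySem.List.pyGet? first_row 1,
          PySem.List.pyGet? first_row 2, PySem.List.pyGet? first_row 3 with
    | some a, some b, some c, some d =>
      let s := PySem.List.sorted first_row (fun x => x) false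
      match PySem.List.pyGet? s 0, PySem.List.pyGet? s (-1) with
      | some lo, some hi =>
        decide (max (-a) (-b) ≤ max c d) && decide (max (-a) (-b) ≤ lo)
          && decide (hi ≤ min c d)
      | _, _ => false  -- unreachable under Pre_
    | _, _, _, _ => false  -- unreachable under Pre_ (Python raises IndexError)

-- ===== PRECONDITION & SPEC =====
-- Pre_ excludes exactly the inputs where Python A raises IndexError:
-- an empty matrix or a first row with fewer than 4 entries.
def Pre_is_extendable (matrix : List (List Int)) : Prop :=
  matrix ≠ [] ∧ 4 ≤ (matrix.headD []).length
instance (matrix : List (List Int)) : Decidable (Pre_is_extendable matrix) := by unfold Pre_is_extendable; infer_instance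

def pvWitness_is_extendable : List (List Int) := [[-1, 0, 2, 3]]

def Spec_is_extendable (matrix : List (List Int)) (out : Bool) : Prop := out = is_extendable_alt matrix
instance (matrix : List (List Int)) (out : Bool) : Decidable (Spec_is_extendable matrix out) := by unfold Spec_is_extendable; infer_instance

-- ===== CLAIM (what is proved, stated in full; the proofs are below) =====
def Claim_equal_is_extendable : Prop := ∀ (matrix : List (List Int)), Dom_is_extendable matrix → Pre_is_extendable matrix → Spec_is_extendable matrix (is_extendable matrix)

-- ===== LEMMAS AND PROOFS =====

theorem pvALoop_eq_decide (a b c d : Int) (l : List Int) :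
    pvALoop a b c d l = decide (∀ t ∈ l, -a ≤ t ∧ t ≤ c ∧ -b ≤ t ∧ t ≤ d) := by
  induction l with
  | nil => simp [pvALoop]
  | cons t ts ih =>
    simp only [pvALoop, ih]
    by_cases h : -a ≤ t ∧ t ≤ c ∧ -b ≤ t ∧ t ≤ d <;> simp [h]

-- the last element of an id-sorted list bounds every member from above
theorem le_getLast_sorted (xs : List Int) (h : PySem.List.sorted xs (fun x => x) false ≠ [])
    (y : Int) (hy : y ∈ PySem.List.sorted xs (fun x => x) false) :
    y ≤ (PySem.List.sorted xs (fun x => x) false).getLast h := by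
  obtain ⟨i, hi, rfl⟩ := List.mem_iff_getElem.mp hy
  rw [List.getLast_eq_getElem]
  exact PySem.List.sorted_id_getElem_mono xs (by omega) (by omega)

theorem a_true_iff (a b c d : Int) (rest : List Int) (tl : List (List Int)) :
    is_extendable ((a :: b :: c :: d :: rest) :: tl) = true ↔
      (-(min a b) ≤ max c d ∧ ∀ t ∈ a :: b :: c :: d :: rest, -a ≤ t ∧ t ≤ c ∧ -b ≤ t ∧ t ≤ d) := by
  simp only [is_extendable, pvALoop_eq_decide]
  by_cases h : -(min a b) ≤ max c d <;> simp [h]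

theorem alt_true_iff (a b c d lo hi : Int) (rest : List Int) (tl : List (List Int))
    (hget0 : PySem.List.pyGet? (PySem.List.sorted (a :: b :: c :: d :: rest) (fun x => x) false) 0 = some lo)
    (hgetn : PySem.List.pyGet? (PySem.List.sorted (a :: b :: c :: d :: rest) (fun x => x) false) (-1) = some hi) :
    is_extendable_alt ((a :: b :: c :: d :: rest) :: tl) = true ↔
      (max (-a) (-b) ≤ max c d ∧ max (-a) (-b) ≤ lo ∧ hi ≤ min c d) := by
  have c0 : (0:Int) ≤ (rest.length:Int)+1+1+1 := by positivity
  have c1 : (0:Int) ≤ (rest.length:Int)+1+1 := by positivity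
  have c2 : (2:Int) ≤ (rest.length:Int)+1+1+1 := by omega
  have c3 : (3:Int) ≤ (rest.length:Int)+1+1+1 := by omega
  simp only [is_extendable_alt, PySem.List.pyGet?_zero_cons,
    hget0, hgetn]
  simp [PySem.List.pyGet?, PySem.List.pyIdx?, c1, c2, c3]
  omega

-- ===== VERDICT (by name: the statement is the Claim_ definition above) =====
theorem is_extendable_spec : Claim_equal_is_extendable := by
  intro matrix _ hpre
  unfold Spec_is_extendable
  obtain ⟨hne, hlen⟩ := hpre
  match matrix with
  | [] => exact absurd rfl hne
  | first_row :: tl =>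
    match first_row with
    | [] | [_] | [_, _] | [_, _, _] => simp at hlen
    | a :: b :: c :: d :: rest =>
      have hsne : PySem.List.sorted (a :: b :: c :: d :: rest) (fun x => x) false ≠ [] := by
        rw [Ne, PySem.List.sorted_eq_nil_iff]; simp
      obtain ⟨m, t, hmt⟩ := List.exists_cons_of_ne_nil hsne
      have hlast := List.getLast_mem hsne
      have hmin : ∀ y ∈ a :: b :: c :: d :: rest, m ≤ y := by
        intro y hy
        simpa using PySem.List.key_head_sorted_le (key := fun x : Int => x)
          (xs := a :: b :: c :: d :: rest) (m := m) (t := t) hmt y hy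
      have hmax : ∀ y ∈ a :: b :: c :: d :: rest,
          y ≤ (PySem.List.sorted (a :: b :: c :: d :: rest) (fun x => x) false).getLast hsne := by
        intro y hy
        exact le_getLast_sorted _ hsne y ((PySem.List.mem_sorted _ _ _ _).mpr hy)
      have hmem_m : m ∈ a :: b :: c :: d :: rest :=
        (PySem.List.mem_sorted _ _ _ _).mp (by rw [hmt]; exact List.mem_cons_self ..)
      have hmem_last :
          (PySem.List.sorted (a :: b :: c :: d :: rest) (fun x => x) false).getLast hsne
            ∈ a :: b :: c :: d :: rest :=
        (PySem.List.mem_sorted _ _ _ _).mp hlast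
      have hget0 : PySem.List.pyGet? (PySem.List.sorted (a :: b :: c :: d :: rest) (fun x => x) false) 0 = some m := by
        rw [hmt]; exact PySem.List.pyGet?_zero_cons ..
      have hgetn : PySem.List.pyGet? (PySem.List.sorted (a :: b :: c :: d :: rest) (fun x => x) false) (-1)
          = some ((PySem.List.sorted (a :: b :: c :: d :: rest) (fun x => x) false).getLast hsne) := by
        rw [PySem.List.pyGet?_neg_one, List.getLast?_eq_some_getLast]
      rw [Bool.eq_iff_iff, a_true_iff, alt_true_iff a b c d m _ rest tl hget0 hgetn]
      constructor
      · rintro ⟨h1, hall⟩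
        have h2 := hall m hmem_m
        have h3 := hall _ hmem_last
        refine ⟨by omega, by omega, by omega⟩
      · rintro ⟨h1, hlo, hhi⟩
        refine ⟨by omega, ?_⟩
        intro y hy
        have h2 := hmin y hy
        have h3 := hmax y hy
        omega
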